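-- pv_equiv track=rewrite | github.com/jaeyoung0509/algorithm_by_python | 01_greedy/t03.py | soulution
-- ===== SOURCE A (Python) =====
-- def soulution(n , m , k , data):
--     # n : 데이터 개수 , m : 숫자가 더해지는 횟수 , k : 특정 인덱스가 k번까지만 더 해질 수 있음
--     m1 , k1 = m  , k
--     answer = 0
--     data.sort(reverse=True)
--     while( m1 > 0 ):
--         for _ in range(k):
--             answer += data[0]
--             m1 -= 1
--             if(m1 == 0):
--                 break
--         if m1 == 0:
--             break
--         else:
--             answer += data[1]
--             m1 -= 1
--     return answer
-- ===== SOURCE B (Python) =====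
-- def soulution(n, m, k, data):
--     # Closed form: with m additions and at most k consecutive uses of the max,
--     # the greedy pattern is blocks of (k * first, 1 * second).
--     # (Like A, this sorts `data` in place; equivalence is about the return value.)
--     data.sort(reverse=True)
--     if m <= 0:
--         return 0
--     cnt_first = (m // (k + 1)) * k + m % (k + 1)
--     if cnt_first == m:
--         return m * data[0]
--     return cnt_first * data[0] + (m - cnt_first) * data[1]
-- ===== Notes on version B (the rewrite author's own statement) =====
-- stated objective: simpler
-- what changed: Replaces A's while/for simulation that adds one element m times with a closed-form count of how many additions go to the largest vs second-largest element.
-- outside the precondition, e.g. on soulution(2, 3, -1, [5, 2]): A returns 6, B raises ZeroDivisionError; on soulution(2, 3, -2, [5, 2]): A returns 6, B returns 24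
import Mathlib
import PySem

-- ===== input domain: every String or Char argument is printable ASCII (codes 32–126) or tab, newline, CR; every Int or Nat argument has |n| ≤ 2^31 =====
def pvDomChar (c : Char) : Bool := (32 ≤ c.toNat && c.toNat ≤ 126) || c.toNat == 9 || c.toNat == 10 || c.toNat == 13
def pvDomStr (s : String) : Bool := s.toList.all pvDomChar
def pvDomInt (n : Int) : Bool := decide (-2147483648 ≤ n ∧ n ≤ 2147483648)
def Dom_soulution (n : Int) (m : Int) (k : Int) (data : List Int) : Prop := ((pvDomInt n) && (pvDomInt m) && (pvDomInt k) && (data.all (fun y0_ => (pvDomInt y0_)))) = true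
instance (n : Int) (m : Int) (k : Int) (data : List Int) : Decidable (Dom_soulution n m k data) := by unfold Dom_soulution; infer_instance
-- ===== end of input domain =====

-- B replaces A's add-one-element-at-a-time loop by the closed-form count of additions
-- that go to the largest vs second-largest element (simpler: two arithmetic lines instead
-- of nested loops). Both A and B sort `data` in place in Python; the equivalence proved
-- here is about the return value only.


-- ===== PORT A =====
-- the inner 'for _ in range(k)' loop: answer += data[0]; m1 -= 1; if m1 == 0: break
-- (the Python 'break' and the subsequent 'if m1 == 0: break' coincide, so the pair
-- (answer, m1) after the for-loop is all the outer loop needs)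
def soulutionInnerA (d0 : Int) : Nat → Int → Int → Int × Int
  | 0, answer, m1 => (answer, m1)
  | j+1, answer, m1 =>
      if m1 - 1 = 0 then (answer + d0, m1 - 1)
      else soulutionInnerA d0 j (answer + d0) (m1 - 1)

-- the outer 'while m1 > 0' loop; fuel = m.toNat suffices since m1 drops by ≥ 1 per round
def soulutionOuterA (d0 d1 : Int) (kn : Nat) : Nat → Int → Int → Int
  | 0, answer, _ => answer
  | fuel+1, answer, m1 =>
      if m1 > 0 then
        let p := soulutionInnerA d0 kn answer m1
        if p.2 = 0 then p.1
        else soulutionOuterA d0 d1 kn fuel (p.1 + d1) (p.2 - 1)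
      else answer

def soulution (n : Int) (m : Int) (k : Int) (data : List Int) : Int :=
  let d := PySem.List.sorted data (fun x => x) true
  -- data[0] / data[1] are only read while the loop runs; Pre_ guarantees they exist there
  let d0 := (PySem.List.pyGet? d 0).getD 0
  let d1 := (PySem.List.pyGet? d 1).getD 0
  soulutionOuterA d0 d1 k.toNat m.toNat 0 m

-- ===== PORT B =====
def soulution_alt (n : Int) (m : Int) (k : Int) (data : List Int) : Int :=
  let d := PySem.List.sorted data (fun x => x) true
  if m ≤ 0 then 0
  else
    let cf := (PySem.Int.floordiv m (k + 1)) * k + PySem.Int.mod m (k + 1)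
    if cf = m then m * (PySem.List.pyGet? d 0).getD 0
    else cf * (PySem.List.pyGet? d 0).getD 0 + (m - cf) * (PySem.List.pyGet? d 1).getD 0

-- ===== PRECONDITION & SPEC =====
-- Pre_ excludes (i) negative k with m > 0, where A still returns (range(k) is empty so A
-- adds only the second-largest element — an artefact outside the problem's natural domain)
-- while B's closed form divides by k+1; and (ii) lists too short for the elements A reads
-- (A raises IndexError there: data[1] needs length ≥ 2 unless m ≤ 0 or m ≤ k with length ≥ 1).
def Pre_soulution (n : Int) (m : Int) (k : Int) (data : List Int) : Prop :=
  m ≤ 0 ∨ (0 ≤ k ∧ ((m ≤ k ∧ 1 ≤ data.length) ∨ 2 ≤ data.length))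
instance (n : Int) (m : Int) (k : Int) (data : List Int) : Decidable (Pre_soulution n m k data) := by unfold Pre_soulution; infer_instance
def pvWitness_soulution : Int × Int × Int × List Int := (2, 7, 2, [4, 3])
def Spec_soulution (n : Int) (m : Int) (k : Int) (data : List Int) (out : Int) : Prop := out = soulution_alt n m k data
instance (n : Int) (m : Int) (k : Int) (data : List Int) (out : Int) : Decidable (Spec_soulution n m k data out) := by unfold Spec_soulution; infer_instance

-- ===== CLAIM (what is proved, stated in full; the proofs are below) =====
def Claim_equal_soulution : Prop := ∀ (n : Int) (m : Int) (k : Int) (data : List Int), Dom_soulution n m k data → Pre_soulution n m k data → Spec_soulution n m k data (soulution n m k data)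

-- ===== LEMMAS AND PROOFS =====

-- closed-form count of additions that go to d0, as a function of the remaining budget
def soulutionCF (k m1 : Int) : Int := (PySem.Int.floordiv m1 (k + 1)) * k + PySem.Int.mod m1 (k + 1)

theorem soulutionInnerA_le {d0 : Int} (j : Nat) (answer m1 : Int)
    (h1 : 0 < m1) (h2 : m1 ≤ (j : Int)) :
    soulutionInnerA d0 j answer m1 = (answer + m1 * d0, 0) := by
  induction j generalizing answer m1 with
  | zero => simp at h2; omega
  | succ j ih =>
    rw [soulutionInnerA]
    by_cases h : m1 - 1 = 0
    · have : m1 = 1 := by omega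
      simp [h, this]
    · rw [if_neg h, ih (answer + d0) (m1 - 1) (by omega) (by push_cast at h2 ⊢; omega), Prod.mk.injEq]
      refine ⟨by ring, rfl⟩

theorem soulutionInnerA_gt {d0 : Int} (j : Nat) (answer m1 : Int)
    (h2 : (j : Int) < m1) :
    soulutionInnerA d0 j answer m1 = (answer + (j : Int) * d0, m1 - (j : Int)) := by
  induction j generalizing answer m1 with
  | zero => simp [soulutionInnerA]
  | succ j ih =>
    rw [soulutionInnerA]
    have h : ¬ (m1 - 1 = 0) := by push_cast at h2; omega
    rw [if_neg h, ih (answer + d0) (m1 - 1) (by push_cast at h2 ⊢; omega), Prod.mk.injEq]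
    constructor <;> push_cast <;> ring

theorem soulutionCF_le {k m1 : Int} (hk : 0 ≤ k) (h1 : 0 ≤ m1) (h2 : m1 ≤ k) :
    soulutionCF k m1 = m1 := by
  unfold soulutionCF
  rw [PySem.Int.floordiv_eq_ediv_of_pos (by omega), PySem.Int.mod_eq_emod_of_pos (by omega)]
  rw [Int.ediv_eq_zero_of_lt h1 (by omega), Int.emod_eq_of_lt h1 (by omega)]
  ring

theorem soulutionCF_step {k m1 : Int} (hk : 0 ≤ k) (h2 : k < m1) :
    soulutionCF k m1 = k + soulutionCF k (m1 - (k + 1)) := by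
  unfold soulutionCF
  rw [PySem.Int.floordiv_eq_ediv_of_pos (by omega : (0:Int) < k + 1),
      PySem.Int.mod_eq_emod_of_pos (by omega : (0:Int) < k + 1),
      PySem.Int.floordiv_eq_ediv_of_pos (by omega : (0:Int) < k + 1),
      PySem.Int.mod_eq_emod_of_pos (by omega : (0:Int) < k + 1)]
  have e1 : m1 - (k + 1) = m1 + (k + 1) * (-1) := by ring
  rw [e1, Int.add_mul_ediv_left _ _ (by omega : k + 1 ≠ 0), Int.add_mul_emod_self_left]
  ring

theorem soulutionCF_zero {k : Int} (hk : 0 ≤ k) : soulutionCF k 0 = 0 := by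
  unfold soulutionCF
  rw [PySem.Int.floordiv_eq_ediv_of_pos (by omega), PySem.Int.mod_eq_emod_of_pos (by omega)]
  simp

theorem soulutionOuterA_eq (d0 d1 : Int) (k : Int) (hk : 0 ≤ k) :
    ∀ (fuel : Nat) (answer m1 : Int), 0 ≤ m1 → m1 ≤ (fuel : Int) →
    soulutionOuterA d0 d1 k.toNat fuel answer m1
      = answer + soulutionCF k m1 * d0 + (m1 - soulutionCF k m1) * d1 := by
  have hkn : ((k.toNat : Nat) : Int) = k := Int.toNat_of_nonneg hk
  intro fuel
  induction fuel with
  | zero =>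
    intro answer m1 h1 h2
    have : m1 = 0 := by simpa using le_antisymm (by simpa using h2) h1
    subst this
    simp [soulutionOuterA, soulutionCF_zero hk]
  | succ fuel ih =>
    intro answer m1 h1 h2
    rcases eq_or_lt_of_le h1 with h0 | h0
    · rw [← h0, soulutionOuterA]
      simp [soulutionCF_zero hk]
    · rw [soulutionOuterA, if_pos h0]
      by_cases hle : m1 ≤ k
      · rw [soulutionInnerA_le k.toNat answer m1 h0 (by rw [hkn]; exact hle)]
        rw [soulutionCF_le hk (by omega) hle]
        simp
      · rw [Int.not_le] at hle
        rw [soulutionInnerA_gt k.toNat answer m1 (by rw [hkn]; exact hle)]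
        rw [hkn]
        have hne : ¬ (m1 - k = 0) := by omega
        rw [if_neg hne]
        rw [ih (answer + k * d0 + d1) (m1 - k - 1) (by omega) (by push_cast at h2 ⊢; omega)]
        have e : m1 - k - 1 = m1 - (k + 1) := by ring
        rw [e, soulutionCF_step hk hle]
        ring

-- ===== VERDICT (by name: the statement is the Claim_ definition above) =====
theorem soulution_spec : Claim_equal_soulution := by
  intro n m k data _ hpre
  unfold Spec_soulution soulution soulution_alt
  by_cases hm : m ≤ 0
  · have : m.toNat = 0 := by omega
    rw [this]
    simp [soulutionOuterA, hm]
  · rw [Int.not_le] at hm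
    have hk : 0 ≤ k := by rcases hpre with h | ⟨hk, _⟩ <;> omega
    rw [if_neg (by omega)]
    rw [soulutionOuterA_eq _ _ k hk m.toNat 0 m (by omega) (by omega)]
    set cf := soulutionCF k m with hcf
    by_cases hce : (PySem.Int.floordiv m (k + 1)) * k + PySem.Int.mod m (k + 1) = m
    · rw [if_pos hce]
      have : cf = m := hce
      rw [this]; ring
    · rw [if_neg hce]
      have : cf = (PySem.Int.floordiv m (k + 1)) * k + PySem.Int.mod m (k + 1) := rfl
      rw [this]; ring
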